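-- pv_equiv track=rewrite | github.com/horlami228/indi-3rdparty-scripts | compare_debian_drivers.py | handle_soname_versions
-- ===== SOURCE A (Python) =====
-- def handle_soname_versions(packages):
--     """Handle soname versioning by keeping only the latest version of each package."""
--     package_dict = {}
--
--     for package in packages:
--         # Extract base name and possible soname version
--         base_name, _, version_suffix = package.rpartition('-')
--         if not version_suffix.isdigit():  # If no version suffix, keep the package name as is
--             base_name = package
--
--         # If we already have a versioned package, keep the latest (e.g., libapogee vs libapogee3)
--         if base_name in package_dict:
--             current_version = package_dict[base_name]
--             # Compare versions, and keep the one with the higher version (e.g., libapogee3 > libapogee)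
--             if version_suffix.isdigit() and int(version_suffix) > int(current_version.rpartition('-')[-1]):
--                 package_dict[base_name] = package
--         else:
--             package_dict[base_name] = package
--
--     # Return only the latest versions of each package
--     return list(package_dict.values())
-- ===== SOURCE B (Python) =====
-- def handle_soname_versions(packages):
--     """Handle soname versioning by keeping only the latest version of each package."""
--     # Pass 1: group the packages by their base name, keys in first-appearance order.
--     groups = {}
--     for package in packages:
--         base_name, _, version_suffix = package.rpartition('-')
--         key = base_name if version_suffix.isdigit() else package
--         groups[key] = groups.get(key, []) + [package]
--     # Pass 2: reduce each group left-to-right to its champion.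
--     result = []
--     for group in groups.values():
--         champion = group[0]
--         for package in group[1:]:
--             suffix = package.rpartition('-')[-1]
--             if suffix.isdigit() and int(suffix) > int(champion.rpartition('-')[-1]):
--                 champion = package
--         result.append(champion)
--     return result
-- ===== Notes on version B (the rewrite author's own statement) =====
-- stated objective: alternative
-- what changed: A keeps one running champion per base name inside a single dict pass; B first groups the packages into a dict of lists keyed by base name and then reduces each group left-to-right to its champion in a second pass.
import Mathlib
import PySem

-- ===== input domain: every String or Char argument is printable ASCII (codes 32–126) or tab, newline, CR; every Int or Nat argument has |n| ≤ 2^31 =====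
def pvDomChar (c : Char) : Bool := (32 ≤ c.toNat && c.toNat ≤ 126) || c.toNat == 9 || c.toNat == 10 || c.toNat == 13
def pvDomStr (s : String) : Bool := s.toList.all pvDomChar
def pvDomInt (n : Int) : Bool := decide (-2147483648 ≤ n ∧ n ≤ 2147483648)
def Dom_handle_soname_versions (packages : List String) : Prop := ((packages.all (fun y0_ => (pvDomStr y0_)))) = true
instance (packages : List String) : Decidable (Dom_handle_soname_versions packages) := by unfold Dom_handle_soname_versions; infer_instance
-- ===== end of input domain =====

-- B replaces A's single running-champion dict pass by a group-into-dict-of-lists pass followed by a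
-- per-group left-to-right reduce: an alternative decomposition of the same task (no speed claim).

-- shared helpers: hand port of s.rpartition('-') (PySem has no rpartition); exact: the third component
-- is the part after the LAST '-' (the whole string when '-' is absent), the first the part before it ('' when absent)
def pvSuf (s : String) : String := String.ofList ((s.toList.reverse.takeWhile (fun c => c ≠ '-')).reverse)
def pvBase (s : String) : String := String.ofList (((s.toList.reverse.dropWhile (fun c => c ≠ '-')).drop 1).reverse)
-- the dict key both Pythons use: the base name for a digit suffix, else the whole package name
def pvKey (s : String) : String := if PySem.Str.strIsdigit (pvSuf s) then pvBase s else s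

-- ===== PORT A =====
-- one iteration of A's loop; none = Python's int() ValueError on the champion's suffix (excluded by Pre_)
def pvStepA (d : PySem.Dict String String) (package : String) : Option (PySem.Dict String String) :=
  match d.get? (pvKey package) with
  | some current =>
      if PySem.Str.strIsdigit (pvSuf package) then
        match PySem.Int.ofStr? (pvSuf package), PySem.Int.ofStr? (pvSuf current) with
        | some pv, some cv => some (if cv < pv then d.insert (pvKey package) package else d)
        | _, _ => none
      else some d
  | none => some (d.insert (pvKey package) package)

def handle_soname_versions (packages : List String) : List String :=
  match packages.foldl (fun od p => od.bind (fun d => pvStepA d p)) (some PySem.Dict.empty) with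
  | some d => d.values
  | none => []    -- unreachable under Pre_: Python raises ValueError there

-- ===== PORT B =====
-- pass 1: groups[key] = groups.get(key, []) + [package]
def pvGroup (g : PySem.Dict String (List String)) (package : String) : PySem.Dict String (List String) :=
  g.insert (pvKey package) (g.getD (pvKey package) [] ++ [package])

-- body of B's inner loop, one champion update; none = Python's int() ValueError (excluded by Pre_)
def pvChampStep (champion package : String) : Option String :=
  if PySem.Str.strIsdigit (pvSuf package) then
    match PySem.Int.ofStr? (pvSuf package), PySem.Int.ofStr? (pvSuf champion) with
    | some pv, some cv => some (if cv < pv then package else champion)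
    | _, _ => none
  else some champion

-- champion = group[0], then B's inner loop over group[1:] ([] is unreachable: every group is nonempty)
def pvReduce : List String → Option String
  | [] => none
  | h :: t => t.foldl (fun oc p => oc.bind (fun c => pvChampStep c p)) (some h)

def handle_soname_versions_alt (packages : List String) : List String :=
  let groups := packages.foldl pvGroup PySem.Dict.empty
  match groups.items.foldl (fun or kv => or.bind (fun r => (pvReduce kv.2).map (fun c => r ++ [c]))) (some []) with
  | some r => r
  | none => []    -- unreachable under Pre_: Python raises ValueError there

-- ===== PRECONDITION & SPEC =====
-- Pre_ excludes exactly the inputs on which Python A raises ValueError: some digit-suffixed package at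
-- position j whose group was opened at an earlier position i by a non-digit-suffixed package whose
-- '-'-suffix int() cannot parse; B raises there too (same comparison), so nothing is claimed there.
def pvPreB (packages : List String) : Bool :=
  (List.range packages.length).all fun i =>
    (List.range packages.length).all fun j =>
      !(decide (i < j) &&
        !PySem.Str.strIsdigit (pvSuf packages[i]!) &&
        PySem.Str.strIsdigit (pvSuf packages[j]!) &&
        (pvKey packages[j]! == pvKey packages[i]!) &&
        ((List.range i).all fun m => !(pvKey packages[m]! == pvKey packages[i]!))) ||
      (PySem.Int.ofStr? (pvSuf packages[i]!)).isSome

def Pre_handle_soname_versions (packages : List String) : Prop := pvPreB packages = true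
instance (packages : List String) : Decidable (Pre_handle_soname_versions packages) := by
  unfold Pre_handle_soname_versions; infer_instance

def pvWitness_handle_soname_versions : List String := ["libindi-1", "libindi-2", "libapogee"]

def Spec_handle_soname_versions (packages : List String) (out : List String) : Prop := out = handle_soname_versions_alt packages
instance (packages : List String) (out : List String) : Decidable (Spec_handle_soname_versions packages out) := by unfold Spec_handle_soname_versions; infer_instance

-- ===== CLAIM (what is proved, stated in full; the proofs are below) =====
def Claim_equal_handle_soname_versions : Prop := ∀ (packages : List String), Dom_handle_soname_versions packages → Pre_handle_soname_versions packages → Spec_handle_soname_versions packages (handle_soname_versions packages)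

-- ===== LEMMAS AND PROOFS =====

-- the relation the induction maintains between A's dict and B's dict of groups
lemma pvStepA_fresh (d : PySem.Dict String String) (p : String)
    (h : d.get? (pvKey p) = none) : pvStepA d p = some (d.insert (pvKey p) p) := by
  simp [pvStepA, h]

lemma pvStepA_none (d : PySem.Dict String String) (p cur : String)
    (h : d.get? (pvKey p) = some cur) (hc : pvChampStep cur p = none) :
    pvStepA d p = none := by
  simp only [pvStepA, h, PySem.Str.strIsdigit_eq]
  simp only [pvChampStep, PySem.Str.strIsdigit_eq] at hc
  by_cases hd : PySem.Chars.strIsdigit (pvSuf p).toList = true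
  · simp only [hd, if_true] at hc ⊢
    cases hp : PySem.Int.ofStr? (pvSuf p) <;> cases hcv : PySem.Int.ofStr? (pvSuf cur) <;>
      simp [hp, hcv] at hc ⊢
  · simp [hd] at hc

lemma pvStepA_some (d : PySem.Dict String String) (p cur c : String)
    (hn : d.keys.Nodup)
    (h : d.get? (pvKey p) = some cur) (hc : pvChampStep cur p = some c) :
    ∃ d', pvStepA d p = some d' ∧
      d'.items = d.items.map (fun q => if q.1 == pvKey p then (pvKey p, c) else q) := by
  have hmem : (pvKey p, cur) ∈ d.items := PySem.Dict.mem_items_of_get?_eq_some d h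
  have hid : d.items.map (fun q => if q.1 == pvKey p then (pvKey p, cur) else q) = d.items := by
    have hpt : ∀ q ∈ d.items, (if q.1 == pvKey p then (pvKey p, cur) else q) = q := by
      intro q hq
      by_cases hk : (q.1 == pvKey p) = true
      · have hk' : q.1 = pvKey p := eq_of_beq hk
        have h2 : d.get? q.1 = some q.2 := PySem.Dict.get?_of_mem_items d hq hn
        have h3 : (some cur : Option String) = some q.2 := by rw [← h, ← hk']; exact h2
        have h4 : cur = q.2 := Option.some.inj h3
        rw [if_pos hk, h4, ← hk']
      · simp [hk]
    rw [List.map_congr_left hpt]; simp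
  simp only [pvStepA, h, PySem.Str.strIsdigit_eq]
  simp only [pvChampStep, PySem.Str.strIsdigit_eq] at hc
  by_cases hd : PySem.Chars.strIsdigit (pvSuf p).toList = true
  · simp only [hd, if_true] at hc ⊢
    cases hp : PySem.Int.ofStr? (pvSuf p) with
    | none => rw [hp] at hc; simp at hc
    | some pv =>
      cases hcv : PySem.Int.ofStr? (pvSuf cur) with
      | none => rw [hp, hcv] at hc; simp at hc
      | some cv =>
        rw [hp, hcv] at hc
        simp only [Option.some.injEq] at hc
        by_cases hlt : cv < pv
        · refine ⟨d.insert (pvKey p) p, by simp [hlt], ?_⟩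
          rw [PySem.Dict.items_insert_of_contains d p (by
            rw [PySem.Dict.contains_eq_isSome_get?, h]; rfl)]
          rw [← hc]; simp [hlt]
        · refine ⟨d, by simp [hlt], ?_⟩
          rw [← hc]; simp only [if_neg hlt]; exact hid.symm
  · simp only [hd, Bool.false_eq_true, if_false, Option.some.injEq] at hc ⊢
    exact ⟨d, rfl, by rw [← hc]; exact hid.symm⟩


def pvInv (g : PySem.Dict String (List String)) (da : Option (PySem.Dict String String)) : Prop :=
  g.keys.Nodup ∧ (∀ kv ∈ g.items, kv.2 ≠ []) ∧
  (∀ d, da = some d →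
      (∀ kv ∈ g.items, (pvReduce kv.2).isSome = true) ∧
      d.items = g.items.map (fun kv => (kv.1, (pvReduce kv.2).getD ""))) ∧
  (da = none → ∃ kv ∈ g.items, pvReduce kv.2 = none)

lemma pvReduce_append (grp : List String) (p : String) (h : grp ≠ []) :
    pvReduce (grp ++ [p]) = (pvReduce grp).bind (fun c => pvChampStep c p) := by
  cases grp with
  | nil => exact absurd rfl h
  | cons h0 t => simp [pvReduce, List.foldl_append]

lemma pvUniqItem {ν : Type} (g : PySem.Dict String ν) (hn : g.keys.Nodup) {k : String} {v : ν}
    (h : g.get? k = some v) : ∀ q ∈ g.items, (q.1 == k) = true → q = (k, v) := by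
  intro q hq hk
  have hk' : q.1 = k := eq_of_beq hk
  have h2 : g.get? q.1 = some q.2 := PySem.Dict.get?_of_mem_items g hq hn
  rw [hk', h] at h2
  have h3 := Option.some.inj h2
  cases q with
  | mk q1 q2 => simp only at hk' h3; rw [hk', h3]

lemma pv_inv (l : List String) :
    pvInv (l.foldl pvGroup PySem.Dict.empty)
          (l.foldl (fun od p => od.bind (fun d => pvStepA d p)) (some PySem.Dict.empty)) := by
  induction l using List.reverseRecOn with
  | nil =>
    refine ⟨by simp, ?_, ?_, ?_⟩
    · intro kv hkv; cases hkv
    · intro d hd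
      obtain rfl : PySem.Dict.empty = d := Option.some.inj hd
      exact ⟨(by intro kv hkv; cases hkv), rfl⟩
    · intro h; cases h
  | append_singleton l p ih =>
    obtain ⟨ihnd, ihne, ihs, ihn0⟩ := ih
    simp only [List.foldl_append, List.foldl_cons, List.foldl_nil]
    set G := l.foldl pvGroup PySem.Dict.empty with hG
    set DA := l.foldl (fun od p => od.bind (fun d => pvStepA d p)) (some PySem.Dict.empty) with hDA
    cases hg : G.get? (pvKey p) with
    | none =>
      -- fresh key: both dicts append a new entry
      have hcont : G.contains (pvKey p) = false := by
        rw [PySem.Dict.contains_eq_isSome_get?, hg]; rfl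
      have hnotmem : pvKey p ∉ G.keys := (PySem.Dict.get?_eq_none_iff_not_mem_keys G _).mp hg
      have hgd : G.getD (pvKey p) [] = [] := PySem.Dict.getD_of_get?_eq_none G [] hg
      have hitems' : (pvGroup G p).items = G.items ++ [(pvKey p, [p])] := by
        rw [pvGroup, hgd]; exact PySem.Dict.items_insert_of_not_contains G _ hcont
      have hkeys' : (pvGroup G p).keys = G.keys ++ [pvKey p] := by
        rw [pvGroup, hgd]; exact PySem.Dict.keys_insert_of_not_contains G _ hcont
      refine ⟨?_, ?_, ?_, ?_⟩
      · rw [hkeys']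
        refine (List.nodup_append).mpr ⟨ihnd, by simp, ?_⟩
        intro a ha b hb
        rw [List.mem_singleton] at hb
        subst hb
        exact fun hc => hnotmem (hc ▸ ha)
      · intro kv hkv
        rw [hitems'] at hkv
        rcases List.mem_append.mp hkv with h1 | h1
        · exact ihne kv h1
        · rcases List.mem_singleton.mp h1 with rfl; simp
      · intro d' hd'
        cases hda : DA with
        | none => rw [hda] at hd'; cases hd'
        | some d =>
          obtain ⟨hall, hitems⟩ := ihs d hda
          have hdkeys : d.keys = G.keys := by
            simp only [PySem.Dict.keys, hitems, List.map_map]; rfl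
          have hdget : d.get? (pvKey p) = none :=
            (PySem.Dict.get?_eq_none_iff_not_mem_keys d _).mpr (hdkeys ▸ hnotmem)
          have hdcont : d.contains (pvKey p) = false := by
            rw [PySem.Dict.contains_eq_isSome_get?, hdget]; rfl
          rw [hda] at hd'
          simp only [Option.bind_some] at hd'
          rw [pvStepA_fresh d p hdget] at hd'
          obtain rfl := Option.some.inj hd'
          constructor
          · intro kv hkv
            rw [hitems'] at hkv
            rcases List.mem_append.mp hkv with h1 | h1
            · exact hall kv h1
            · rcases List.mem_singleton.mp h1 with rfl; simp [pvReduce]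
          · rw [PySem.Dict.items_insert_of_not_contains d p hdcont, hitems, hitems']
            simp [pvReduce]
      · intro h0
        cases hda : DA with
        | some d => rw [hda] at h0; simp only [Option.bind_some] at h0
                    rw [pvStepA_fresh, ] at h0
                    · cases h0
                    · obtain ⟨hall, hitems⟩ := ihs d hda
                      have hdkeys : d.keys = G.keys := by
                        simp only [PySem.Dict.keys, hitems, List.map_map]; rfl
                      exact (PySem.Dict.get?_eq_none_iff_not_mem_keys d _).mpr (hdkeys ▸ hnotmem)
        | none =>
          obtain ⟨kv, hkv, hred⟩ := ihn0 hda
          exact ⟨kv, by rw [hitems']; exact List.mem_append_left _ hkv, hred⟩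
    | some grp =>
      have hcont : G.contains (pvKey p) = true := by
        rw [PySem.Dict.contains_eq_isSome_get?, hg]; rfl
      have hgd : G.getD (pvKey p) [] = grp := PySem.Dict.getD_of_get?_eq_some G [] hg
      have hgrpne : grp ≠ [] := ihne (pvKey p, grp) (PySem.Dict.mem_items_of_get?_eq_some G hg)
      have huniq := pvUniqItem G ihnd hg
      have hitems' : (pvGroup G p).items
          = G.items.map (fun q => if q.1 == pvKey p then (pvKey p, grp ++ [p]) else q) := by
        rw [pvGroup, hgd]; exact PySem.Dict.items_insert_of_contains G _ hcont
      have hkeys' : (pvGroup G p).keys = G.keys := by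
        rw [pvGroup, hgd]; exact PySem.Dict.keys_insert_of_contains G _ hcont
      have hne' : ∀ kv ∈ (pvGroup G p).items, kv.2 ≠ [] := by
        intro kv hkv
        rw [hitems'] at hkv
        obtain ⟨q, hq, hqe⟩ := List.mem_map.mp hkv
        by_cases hk : (q.1 == pvKey p) = true
        · rw [if_pos hk] at hqe; rw [← hqe]; simp
        · rw [if_neg hk] at hqe; rw [← hqe]; exact ihne q hq
      refine ⟨hkeys' ▸ ihnd, hne', ?_, ?_⟩
      · intro d' hd'
        cases hda : DA with
        | none => rw [hda] at hd'; cases hd'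
        | some d =>
          obtain ⟨hall, hitems⟩ := ihs d hda
          have hdnd : d.keys.Nodup := by
            have : d.keys = G.keys := by
              simp only [PySem.Dict.keys, hitems, List.map_map]; rfl
            rw [this]; exact ihnd
          obtain ⟨cur, hred⟩ := Option.isSome_iff_exists.mp
            (hall (pvKey p, grp) (PySem.Dict.mem_items_of_get?_eq_some G hg))
          have hdget : d.get? (pvKey p) = some cur := by
            have hmem : (pvKey p, (pvReduce grp).getD "") ∈ d.items := by
              rw [hitems]
              exact List.mem_map.mpr ⟨(pvKey p, grp), PySem.Dict.mem_items_of_get?_eq_some G hg, rfl⟩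
            have := PySem.Dict.get?_of_mem_items d hmem hdnd
            rwa [hred, Option.getD_some] at this
          rw [hda] at hd'; simp only [Option.bind_some] at hd'
          cases hcs : pvChampStep cur p with
          | none => rw [pvStepA_none d p cur hdget hcs] at hd'; cases hd'
          | some c =>
            obtain ⟨d2, hstep, hd2⟩ := pvStepA_some d p cur c hdnd hdget hcs
            rw [hstep] at hd'
            obtain rfl := Option.some.inj hd'
            have hrednew : pvReduce (grp ++ [p]) = some c := by
              rw [pvReduce_append grp p hgrpne, hred]; simpa using hcs
            constructor
            · intro kv hkv
              rw [hitems'] at hkv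
              obtain ⟨q, hq, hqe⟩ := List.mem_map.mp hkv
              by_cases hk : (q.1 == pvKey p) = true
              · rw [if_pos hk] at hqe; rw [← hqe]; simp [hrednew]
              · rw [if_neg hk] at hqe; rw [← hqe]; exact hall q hq
            · rw [hd2, hitems, hitems', List.map_map, List.map_map]
              refine List.map_congr_left ?_
              intro q hq
              by_cases hk : (q.1 == pvKey p) = true
              · obtain rfl := huniq q hq hk
                simp [hrednew]
              · have hk' : q.1 ≠ pvKey p := fun hc => hk (by simp [hc])
                simp [hk']
      · intro h0
        cases hda : DA with
        | some d =>
          obtain ⟨hall, hitems⟩ := ihs d hda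
          have hdnd : d.keys.Nodup := by
            have : d.keys = G.keys := by
              simp only [PySem.Dict.keys, hitems, List.map_map]; rfl
            rw [this]; exact ihnd
          obtain ⟨cur, hred⟩ := Option.isSome_iff_exists.mp
            (hall (pvKey p, grp) (PySem.Dict.mem_items_of_get?_eq_some G hg))
          have hdget : d.get? (pvKey p) = some cur := by
            have hmem : (pvKey p, (pvReduce grp).getD "") ∈ d.items := by
              rw [hitems]
              exact List.mem_map.mpr ⟨(pvKey p, grp), PySem.Dict.mem_items_of_get?_eq_some G hg, rfl⟩
            have := PySem.Dict.get?_of_mem_items d hmem hdnd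
            rwa [hred, Option.getD_some] at this
          rw [hda] at h0; simp only [Option.bind_some] at h0
          cases hcs : pvChampStep cur p with
          | some c =>
            obtain ⟨d2, hstep, _⟩ := pvStepA_some d p cur c hdnd hdget hcs
            rw [hstep] at h0; cases h0
          | none =>
            refine ⟨(pvKey p, grp ++ [p]), ?_, ?_⟩
            · rw [hitems']
              refine List.mem_map.mpr ⟨(pvKey p, grp), PySem.Dict.mem_items_of_get?_eq_some G hg, ?_⟩
              simp
            · rw [pvReduce_append grp p hgrpne, hred]; simpa using hcs
        | none =>
          obtain ⟨kv, hkv, hred⟩ := ihn0 hda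
          by_cases hk : (kv.1 == pvKey p) = true
          · obtain rfl := huniq kv hkv hk
            refine ⟨(pvKey p, grp ++ [p]), ?_, ?_⟩
            · rw [hitems']
              refine List.mem_map.mpr ⟨(pvKey p, grp), PySem.Dict.mem_items_of_get?_eq_some G hg, ?_⟩
              simp
            · rw [pvReduce_append grp p hgrpne, hred]; rfl
          · refine ⟨kv, ?_, hred⟩
            rw [hitems']
            refine List.mem_map.mpr ⟨kv, hkv, ?_⟩
            rw [if_neg hk]

lemma pvCollect_some (xs : List (String × List String))
    (h : ∀ kv ∈ xs, (pvReduce kv.2).isSome = true) (acc : List String) :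
    xs.foldl (fun or kv => or.bind (fun r => (pvReduce kv.2).map (fun c => r ++ [c]))) (some acc)
      = some (acc ++ xs.map (fun kv => (pvReduce kv.2).getD "")) := by
  induction xs generalizing acc with
  | nil => simp
  | cons kv t ih =>
    obtain ⟨c, hc⟩ := Option.isSome_iff_exists.mp (h kv (by simp))
    simp only [List.foldl_cons, hc, Option.bind_some, Option.map_some]
    rw [ih (fun q hq => h q (by simp [hq])) (acc ++ [c])]
    simp [hc]

lemma pvCollect_noneAcc (xs : List (String × List String)) :
    xs.foldl (fun or kv => or.bind (fun r => (pvReduce kv.2).map (fun c => r ++ [c]))) none = none := by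
  induction xs with
  | nil => rfl
  | cons kv t ih => simpa using ih

lemma pvCollect_none (xs : List (String × List String))
    (h : ∃ kv ∈ xs, pvReduce kv.2 = none) (acc : List String) :
    xs.foldl (fun or kv => or.bind (fun r => (pvReduce kv.2).map (fun c => r ++ [c]))) (some acc)
      = none := by
  induction xs generalizing acc with
  | nil => simp at h
  | cons kv t ih =>
    obtain ⟨q, hq, hr⟩ := h
    rcases List.mem_cons.mp hq with hq | hq
    · subst hq
      simp only [List.foldl_cons, hr, Option.map_none]
      exact pvCollect_noneAcc t
    · cases hc : pvReduce kv.2 with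
      | none =>
        simp only [List.foldl_cons, hc, Option.map_none]
        exact pvCollect_noneAcc t
      | some c =>
        simp only [List.foldl_cons, hc, Option.bind_some, Option.map_some]
        exact ih ⟨q, hq, hr⟩ _

-- ===== VERDICT (by name: the statement is the Claim_ definition above) =====
theorem handle_soname_versions_spec : Claim_equal_handle_soname_versions := by
  intro packages _ _
  unfold Spec_handle_soname_versions
  obtain ⟨hnd, hne, hsome, hnone⟩ := pv_inv packages
  show handle_soname_versions packages = handle_soname_versions_alt packages
  have ha : handle_soname_versions packages
      = match packages.foldl (fun od p => od.bind (fun d => pvStepA d p)) (some PySem.Dict.empty) with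
        | some d => d.values
        | none => [] := rfl
  have hb : handle_soname_versions_alt packages
      = match (packages.foldl pvGroup PySem.Dict.empty).items.foldl
            (fun or kv => or.bind (fun r => (pvReduce kv.2).map (fun c => r ++ [c]))) (some []) with
        | some r => r
        | none => [] := rfl
  rw [ha, hb]
  cases hda : packages.foldl (fun od p => od.bind (fun d => pvStepA d p)) (some PySem.Dict.empty) with
  | none =>
    rw [pvCollect_none _ (hnone hda) []]
  | some d =>
    obtain ⟨hall, hitems⟩ := hsome d hda
    rw [pvCollect_some _ hall []]
    simp only [PySem.Dict.values, hitems, List.map_map, List.nil_append]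
    rfl
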